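-- pv_equiv track=rewrite | github.com/Yevhen-Yezerskyy/mailer-app | engine/core_validate/val_expand_processor.py | _next_score
-- ===== SOURCE A (Python) =====
-- from typing import Dict, List, Optional, Tuple
--
-- def _next_score(groups: List[Tuple[int, List[Tuple[int, int]]]], score: int) -> Optional[int]:
--     found = False
--     for s, _pairs in groups:
--         if found:
--             return int(s)
--         if int(s) == int(score):
--             found = True
--     return None
-- ===== SOURCE B (Python) =====
-- def _next_score(groups, score):
--     nxt = {}
--     for (s, _), (s2, _) in zip(groups, groups[1:]):
--         nxt.setdefault(int(s), int(s2))
--     return nxt.get(int(score))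
-- ===== Notes on version B (the rewrite author's own statement) =====
-- stated objective: alternative
-- what changed: Replaces A's flag-carrying scan with a successor map: B zips consecutive groups into a first-occurrence-wins dict of score -> next score and answers with a single dict lookup.
import Mathlib
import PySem

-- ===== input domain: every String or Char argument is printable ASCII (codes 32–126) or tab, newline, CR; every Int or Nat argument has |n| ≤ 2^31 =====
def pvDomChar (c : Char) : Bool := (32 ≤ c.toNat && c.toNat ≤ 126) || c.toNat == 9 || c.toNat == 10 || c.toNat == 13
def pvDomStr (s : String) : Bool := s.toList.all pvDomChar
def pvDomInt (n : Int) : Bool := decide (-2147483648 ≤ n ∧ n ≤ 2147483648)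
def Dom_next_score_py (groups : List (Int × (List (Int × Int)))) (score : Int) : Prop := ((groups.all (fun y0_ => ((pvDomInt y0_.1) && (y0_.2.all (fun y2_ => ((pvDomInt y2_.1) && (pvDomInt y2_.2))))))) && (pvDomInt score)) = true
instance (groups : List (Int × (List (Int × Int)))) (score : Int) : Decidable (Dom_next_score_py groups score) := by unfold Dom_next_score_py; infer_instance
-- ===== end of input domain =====

-- B replaces A's flag-carrying linear scan by a successor dict built from consecutive pairs
-- (first occurrence wins via setdefault) followed by one lookup; alternative decomposition, same cost.

-- ===== PORT A =====
-- the for-loop with the `found` flag, one step per group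
def nextScoreLoop (score : Int) : List (Int × (List (Int × Int))) → Bool → Option Int
  | [], _ => none
  | (s, _) :: t, found => if found then some s else nextScoreLoop score t (s == score)

def next_score_py (groups : List (Int × (List (Int × Int)))) (score : Int) : Option Int :=
  nextScoreLoop score groups false

-- ===== PORT B =====
-- nxt.setdefault(int(s), int(s2)) over zip(groups, groups[1:]), then nxt.get(int(score))
def next_score_py_alt (groups : List (Int × (List (Int × Int)))) (score : Int) : Option Int :=
  let nxt := (groups.zip groups.tail).foldl
    (fun d p => d.setdefault p.1.1 p.2.1) (PySem.Dict.empty : PySem.Dict Int Int)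
  nxt.get? score

-- ===== PRECONDITION & SPEC =====
def Spec_next_score_py (groups : List (Int × (List (Int × Int)))) (score : Int) (out : Option Int) : Prop := out = next_score_py_alt groups score
instance (groups : List (Int × (List (Int × Int)))) (score : Int) (out : Option Int) : Decidable (Spec_next_score_py groups score out) := by unfold Spec_next_score_py; infer_instance

-- ===== CLAIM (what is proved, stated in full; the proofs are below) =====
def Claim_equal_next_score_py : Prop := ∀ (groups : List (Int × (List (Int × Int)))) (score : Int), Dom_next_score_py groups score → Spec_next_score_py groups score (next_score_py groups score)

-- ===== LEMMAS AND PROOFS =====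

-- first association of k in a list of consecutive-group pairs
def firstSucc (l : List ((Int × (List (Int × Int))) × (Int × (List (Int × Int))))) (k : Int) : Option Int :=
  match l with
  | [] => none
  | p :: t => if p.1.1 = k then some p.2.1 else firstSucc t k

theorem get?_foldl_setdefault (l : List ((Int × (List (Int × Int))) × (Int × (List (Int × Int)))))
    (d : PySem.Dict Int Int) (k : Int) :
    (l.foldl (fun d p => d.setdefault p.1.1 p.2.1) d).get? k = (d.get? k).or (firstSucc l k) := by
  induction l generalizing d with
  | nil => simp [firstSucc]
  | cons p t ih =>
    rw [List.foldl_cons, ih, firstSucc]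
    by_cases hc : d.contains p.1.1
    · rw [PySem.Dict.setdefault_of_contains _ _ hc]
      by_cases hk : p.1.1 = k
      · have hvs : (d.get? k).isSome := by
          rw [← hk, ← PySem.Dict.contains_eq_isSome_get?]; exact hc
        obtain ⟨v, hv⟩ := Option.isSome_iff_exists.mp hvs
        rw [hv]
        simp
      · simp [hk]
    · rw [PySem.Dict.setdefault_of_not_contains _ _ (by simpa using hc)]
      rw [PySem.Dict.get?_insert]
      by_cases hk : k = p.1.1
      · have hd0 : d.get? k = none := by
          rw [PySem.Dict.get?_eq_none_iff_contains, hk]; simpa using hc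
        rw [if_pos hk, if_pos hk.symm, hd0]
        simp
      · rw [if_neg hk, if_neg (Ne.symm hk)]

theorem loop_eq_firstSucc (score : Int) (groups : List (Int × (List (Int × Int)))) :
    nextScoreLoop score groups false = firstSucc (groups.zip groups.tail) score := by
  induction groups with
  | nil => simp [nextScoreLoop, firstSucc]
  | cons hd t ih =>
    obtain ⟨s, p⟩ := hd
    cases t with
    | nil => simp [nextScoreLoop, firstSucc]
    | cons hd2 t2 =>
      obtain ⟨s2, p2⟩ := hd2
      show nextScoreLoop score ((s2, p2) :: t2) (s == score) = _
      by_cases hs : s = score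
      · simp [hs, nextScoreLoop, firstSucc]
      · have hb : (s == score) = false := by simpa using hs
        rw [hb, ih]
        simp [firstSucc, hs]

-- ===== VERDICT (by name: the statement is the Claim_ definition above) =====
theorem next_score_py_spec : Claim_equal_next_score_py := by
  intro groups score _
  unfold Spec_next_score_py next_score_py next_score_py_alt
  rw [loop_eq_firstSucc, get?_foldl_setdefault]
  simp
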